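-- pv_equiv track=rewrite | github.com/kungfumanda/CINtofome | checksum.py | checksumRecive
-- ===== SOURCE A (Python) =====
-- def checksumRecive(file, cs):
--     for i in range(0,len(file),2):
--         if i + 1 >= len(file):
--             cs += ord(file[i]) & 0xFF
--         else:
--             w = ((ord(file[i]) << 8) & 0xFF00) + (ord(file[i+1]) & 0xFF)
--             cs += w
--
--     while (cs >> 16) > 0:
--         cs = (cs & 0xFFFF) + (cs >> 16)
--
--     #compara se a soma bateu (so tem numeros 1 no resultado em bit)
--     if (cs == 0xFFFF):
--         retorno = "Mensagem recebida por completo"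
--     else:
--         retorno = "Dados perdidos no envio"
--     return retorno
-- ===== SOURCE B (Python) =====
-- def checksumRecive(file, cs):
--     pending = None
--     for c in file:
--         b = ord(c) & 0xFF
--         if pending is None:
--             pending = b
--         else:
--             cs += (pending << 8) + b
--             pending = None
--     if pending is not None:
--         cs += pending
--     while (cs >> 16) > 0:
--         cs = (cs & 0xFFFF) + (cs >> 16)
--     return "Mensagem recebida por completo" if cs == 0xFFFF else "Dados perdidos no envio"
-- ===== Notes on version B (the rewrite author's own statement) =====
-- stated objective: alternative
-- what changed: B iterates over the characters themselves with a pending-byte state (no indices, no range stepping): each byte is either stored as the pending high byte or combined with it as (pending << 8) + b and added to cs, with a leftover pending byte flushed unshifted at the end; the carry-fold loop and final 0xFFFF comparison are unchanged.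
import Mathlib
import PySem

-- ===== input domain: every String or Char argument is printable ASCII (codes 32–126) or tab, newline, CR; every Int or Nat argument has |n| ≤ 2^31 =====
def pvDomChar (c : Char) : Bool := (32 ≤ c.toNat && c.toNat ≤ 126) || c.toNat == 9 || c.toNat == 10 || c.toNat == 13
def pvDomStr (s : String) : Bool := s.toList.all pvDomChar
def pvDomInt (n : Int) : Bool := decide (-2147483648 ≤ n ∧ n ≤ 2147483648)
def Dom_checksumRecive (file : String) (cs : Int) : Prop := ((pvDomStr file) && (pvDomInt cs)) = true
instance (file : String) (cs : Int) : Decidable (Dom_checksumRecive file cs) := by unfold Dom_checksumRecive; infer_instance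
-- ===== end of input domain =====

-- B walks the characters themselves with a pending-byte state (no indices, no
-- stepped range): a byte is stored as pending or combined with the pending high
-- byte and added to cs; a leftover pending byte is flushed unshifted.  The carry
-- loop and the final comparison are as in A.

-- ord(c)
def pvOrd (c : Char) : Int := (c.toNat : Int)

-- the carry fold `while (cs >> 16) > 0: cs = (cs & 0xFFFF) + (cs >> 16)`,
-- textually identical in A and in B, so shared by both ports
def pvCarry (cs : Int) : Int :=
  if _h : 0 < cs >>> (16 : Nat) then
    pvCarry (PySem.Int.band cs 0xFFFF + cs >>> (16 : Nat))
  else cs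
termination_by cs.toNat
decreasing_by
  rw [Int.shiftRight_eq_div_pow] at _h ⊢
  norm_num at _h ⊢
  have h0 : (0:Int) ≤ cs := by omega
  rw [PySem.Int.band_of_nonneg h0 (by norm_num)]
  have hm : cs.toNat &&& (65535:Int).toNat = cs.toNat % 65536 := by
    have hx := Nat.and_two_pow_sub_one_eq_mod cs.toNat 16
    norm_num at hx
    exact hx
  rw [hm]
  omega

-- ===== PORT A =====
def checksumRecive (file : String) (cs : Int) : String :=
  let chars := file.toList
  let n : Int := PySem.Str.len file
  let cs := (PySem.List.pyRange 0 n 2).foldl (fun cs i =>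
      if i + 1 ≥ n then
        cs + PySem.Int.band (pvOrd (PySem.List.pyGetD chars i ' ')) 0xFF
      else
        cs + (PySem.Int.band (pvOrd (PySem.List.pyGetD chars i ' ') <<< (8 : Nat)) 0xFF00
              + PySem.Int.band (pvOrd (PySem.List.pyGetD chars (i + 1) ' ')) 0xFF)) cs
  let cs := pvCarry cs
  if cs == 0xFFFF then "Mensagem recebida por completo" else "Dados perdidos no envio"

-- ===== PORT B =====
def checksumRecive_alt (file : String) (cs : Int) : String :=
  let st := file.toList.foldl (fun (st : Int × Option Int) c =>
      let b := PySem.Int.band (pvOrd c) 0xFF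
      match st.2 with
      | none => (st.1, some b)
      | some p => (st.1 + (p <<< (8 : Nat) + b), none)) (cs, none)
  let cs := match st.2 with
    | some p => st.1 + p
    | none => st.1
  let cs := pvCarry cs
  if cs == 0xFFFF then "Mensagem recebida por completo" else "Dados perdidos no envio"

-- ===== PRECONDITION & SPEC =====
def Spec_checksumRecive (file : String) (cs : Int) (out : String) : Prop := out = checksumRecive_alt file cs
instance (file : String) (cs : Int) (out : String) : Decidable (Spec_checksumRecive file cs out) := by unfold Spec_checksumRecive; infer_instance

-- ===== CLAIM (what is proved, stated in full; the proofs are below) =====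
def Claim_equal_checksumRecive : Prop := ∀ (file : String) (cs : Int), Dom_checksumRecive file cs → Spec_checksumRecive file cs (checksumRecive file cs)

-- ===== LEMMAS AND PROOFS =====

-- spec-side pair sums: even-index bytes, odd-index bytes, the lone trailing byte
def pvHi : List Char → Int
  | [] => 0
  | [_] => 0
  | c1 :: _ :: r => (c1.toNat : Int) + pvHi r

def pvLo : List Char → Int
  | [] => 0
  | [_] => 0
  | _ :: c2 :: r => (c2.toNat : Int) + pvLo r

def pvLone : List Char → Int
  | [] => 0
  | [c] => (c.toNat : Int)
  | _ :: _ :: r => pvLone r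

lemma mask255 {c : Char} (h : c.toNat ≤ 126) :
    PySem.Int.band (pvOrd c) 0xFF = pvOrd c := by
  have key : ∀ x : Nat, x < 128 → x &&& 255 = x := by decide
  have hb : PySem.Int.band (pvOrd c) 0xFF = ((c.toNat &&& 255 : Nat) : Int) := by
    simpa [pvOrd] using PySem.Int.band_natCast c.toNat 255
  rw [hb, key _ (by omega)]
  rfl

lemma maskHi {c : Char} (h : c.toNat ≤ 126) :
    PySem.Int.band (pvOrd c <<< (8 : Nat)) 0xFF00 = 256 * pvOrd c := by
  have key : ∀ x : Nat, x < 128 → x * 256 &&& 65280 = x * 256 := by decide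
  have h1 : pvOrd c <<< (8 : Nat) = ((c.toNat * 256 : Nat) : Int) := by
    rw [Int.shiftLeft_eq]; simp [pvOrd]
  rw [h1]
  have hb : PySem.Int.band ((c.toNat * 256 : Nat) : Int) 0xFF00
      = ((c.toNat * 256 &&& 65280 : Nat) : Int) := by
    simpa using PySem.Int.band_natCast (c.toNat * 256) 65280
  rw [hb, key _ (by omega)]
  push_cast [pvOrd]
  ring

lemma pyRange_two_eq_nil (a b : Int) (h : b ≤ a) : PySem.List.pyRange a b 2 = [] := by
  rw [PySem.List.pyRange_of_pos a b (by norm_num)]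
  simp [show ¬ a < b by omega]

lemma pyRange_two_cons (a b : Int) (h : a < b) :
    PySem.List.pyRange a b 2 = a :: PySem.List.pyRange (a + 2) b 2 := by
  rw [PySem.List.pyRange_of_pos a b (by norm_num),
      PySem.List.pyRange_of_pos (a + 2) b (by norm_num)]
  have hcnt : (if a < b then ((b - a + 2 - 1) / 2).toNat else 0)
      = (if a + 2 < b then ((b - (a + 2) + 2 - 1) / 2).toNat else 0) + 1 := by
    split_ifs <;> omega
  rw [hcnt, List.range_succ_eq_map, List.map_cons, List.map_map]
  congr 1
  · norm_num
  · apply List.map_congr_left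
    intro k _
    simp [Nat.succ_eq_add_one]
    ring

lemma pyRange_two_shift (a b : Int) :
    PySem.List.pyRange (a + 2) b 2 = (PySem.List.pyRange a (b - 2) 2).map (· + 2) := by
  rw [PySem.List.pyRange_of_pos (a + 2) b (by norm_num),
      PySem.List.pyRange_of_pos a (b - 2) (by norm_num)]
  have hcnt : (if a + 2 < b then ((b - (a + 2) + 2 - 1) / 2).toNat else 0)
      = (if a < b - 2 then ((b - 2 - a + 2 - 1) / 2).toNat else 0) := by
    split_ifs <;> omega
  rw [hcnt, List.map_map]
  apply List.map_congr_left
  intro k _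
  simp
  ring

lemma pyGetD_cons_cons_add_two (c1 c2 : Char) (r : List Char) (i : Int) (d : Char)
    (h0 : 0 ≤ i) (h1 : i < (r.length : Int)) :
    PySem.List.pyGetD (c1 :: c2 :: r) (i + 2) d = PySem.List.pyGetD r i d := by
  rw [PySem.List.pyGetD_eq_getElem _ d (by omega) (by simp; omega),
      PySem.List.pyGetD_eq_getElem _ d h0 h1]
  have h2 : (i + 2).toNat = i.toNat + 2 := by omega
  simp [h2]

lemma loopA (l : List Char) (n : Int) (hn : n = (l.length : Int))
    (h : ∀ c ∈ l, c.toNat ≤ 126) (cs : Int) :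
    (PySem.List.pyRange 0 n 2).foldl (fun cs i =>
      if i + 1 ≥ n then
        cs + PySem.Int.band (pvOrd (PySem.List.pyGetD l i ' ')) 0xFF
      else
        cs + (PySem.Int.band (pvOrd (PySem.List.pyGetD l i ' ') <<< (8 : Nat)) 0xFF00
              + PySem.Int.band (pvOrd (PySem.List.pyGetD l (i + 1) ' ')) 0xFF)) cs
    = cs + 256 * pvHi l + pvLo l + pvLone l := by
  subst hn
  induction l using pvHi.induct generalizing cs with
  | case1 =>
      simp [pyRange_two_eq_nil 0 0 (by norm_num), pvHi, pvLo, pvLone]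
  | case2 c =>
      have hc : c.toNat ≤ 126 := h c (by simp)
      rw [pyRange_two_cons 0 _ (by simp), pyRange_two_eq_nil (0 + 2) _ (by simp)]
      simp [pvHi, pvLo, pvLone, PySem.List.pyGetD_zero_cons, pvOrd]
      simpa [pvOrd] using mask255 hc
  | case3 c1 c2 r ih =>
      have hc1 : c1.toNat ≤ 126 := h c1 (by simp)
      have hc2 : c2.toNat ≤ 126 := h c2 (by simp)
      have hn : ((c1 :: c2 :: r).length : Int) = (r.length : Int) + 2 := by
        simp; ring
      rw [pyRange_two_cons 0 _ (by omega), pyRange_two_shift, List.foldl_cons]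
      rw [if_neg (by omega)]
      rw [show PySem.List.pyGetD (c1 :: c2 :: r) 0 ' ' = c1 from
        PySem.List.pyGetD_zero_cons c1 _ ' ']
      rw [show PySem.List.pyGetD (c1 :: c2 :: r) (0 + 1) ' ' = c2 by
        norm_num [PySem.List.pyGetD_ofNat' (c1 :: c2 :: r) 1 ' ']]
      rw [maskHi hc1, mask255 hc2, List.foldl_map]
      rw [show ((c1 :: c2 :: r).length : Int) - 2 = (r.length : Int) by omega]
      rw [PySem.List.foldl_congr_mem _ _ (fun cs i =>
        if i + 1 ≥ (r.length : Int) then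
          cs + PySem.Int.band (pvOrd (PySem.List.pyGetD r i ' ')) 0xFF
        else
          cs + (PySem.Int.band (pvOrd (PySem.List.pyGetD r i ' ') <<< (8 : Nat)) 0xFF00
                + PySem.Int.band (pvOrd (PySem.List.pyGetD r (i + 1) ' ')) 0xFF)) _ ?_]
      · rw [ih (fun c hc => h c (by simp [hc]))]
        simp [pvHi, pvLo, pvLone, pvOrd]
        ring
      · intro acc x hx
        beta_reduce
        have hx' := (PySem.List.mem_pyRange_iff_of_pos (by norm_num : (0:Int) < 2) x).1 hx
        have hx0 : 0 ≤ x := by omega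
        have hxlt : x < (r.length : Int) := by omega
        by_cases hb : x + 1 ≥ (r.length : Int)
        · rw [if_pos (by omega), if_pos hb,
              pyGetD_cons_cons_add_two c1 c2 r x ' ' hx0 hxlt]
        · rw [if_neg (by omega), if_neg hb,
              pyGetD_cons_cons_add_two c1 c2 r x ' ' hx0 hxlt,
              show x + 2 + 1 = (x + 1) + 2 by ring,
              pyGetD_cons_cons_add_two c1 c2 r (x + 1) ' ' (by omega) (by omega)]

-- B's pending-state fold, flushed, equals the same three sums
lemma loopB (l : List Char) (h : ∀ c ∈ l, c.toNat ≤ 126) (cs : Int) :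
    (match (l.foldl (fun (st : Int × Option Int) c =>
        match st.2 with
        | none => (st.1, some (PySem.Int.band (pvOrd c) 0xFF))
        | some p => (st.1 + (p <<< (8 : Nat) + PySem.Int.band (pvOrd c) 0xFF), none)) (cs, none)).2 with
      | some p => (l.foldl (fun (st : Int × Option Int) c =>
          match st.2 with
          | none => (st.1, some (PySem.Int.band (pvOrd c) 0xFF))
          | some p => (st.1 + (p <<< (8 : Nat) + PySem.Int.band (pvOrd c) 0xFF), none)) (cs, none)).1 + p
      | none => (l.foldl (fun (st : Int × Option Int) c =>
          match st.2 with
          | none => (st.1, some (PySem.Int.band (pvOrd c) 0xFF))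
          | some p => (st.1 + (p <<< (8 : Nat) + PySem.Int.band (pvOrd c) 0xFF), none)) (cs, none)).1)
    = cs + 256 * pvHi l + pvLo l + pvLone l := by
  induction l using pvHi.induct generalizing cs with
  | case1 => simp [pvHi, pvLo, pvLone]
  | case2 c =>
      have hc : c.toNat ≤ 126 := h c (by simp)
      simp only [List.foldl_cons, List.foldl_nil]
      rw [mask255 hc]
      simp [pvHi, pvLo, pvLone, pvOrd]
  | case3 c1 c2 r ih =>
      have hc1 : c1.toNat ≤ 126 := h c1 (by simp)
      have hc2 : c2.toNat ≤ 126 := h c2 (by simp)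
      simp only [List.foldl_cons]
      rw [ih (fun c hc => h c (by simp [hc]))]
      rw [mask255 hc1, mask255 hc2, Int.shiftLeft_eq]
      simp [pvHi, pvLo, pvLone, pvOrd]
      ring

-- ===== VERDICT (by name: the statement is the Claim_ definition above) =====
theorem checksumRecive_spec : Claim_equal_checksumRecive := by
  intro file cs hdom
  unfold Spec_checksumRecive
  simp only [checksumRecive, checksumRecive_alt]
  have hchars : ∀ c ∈ file.toList, c.toNat ≤ 126 := by
    intro c hc
    have hd : pvDomChar c = true := by
      unfold Dom_checksumRecive at hdom
      simp [pvDomStr, List.all_eq_true] at hdom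
      exact hdom.1 c hc
    unfold pvDomChar at hd
    simp at hd
    omega
  have hlen : PySem.Str.len file = (file.toList.length : Int) := PySem.Str.len_eq file
  rw [loopA file.toList _ hlen hchars cs, loopB file.toList hchars cs]
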